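-- pv_equiv track=rewrite | github.com/Yohager/Leetcode | python版本/5742-SortSentence.py | sortSentence
-- ===== SOURCE A (Python) =====
-- def sortSentence(s: str) -> str:
--     tmp = s.split(' ')
--     ans = []
--     for i in tmp:
--         a = list()
--         for k in i:
--             if k.isdigit():
--                 a.append(k)
--                 a.append(i)
--                 break
--         ans.append(a)
--     ans.sort()
--     res = []
--     for x in ans:
--         res.append(x[1][:-1])
--     return ' '.join(res)
-- ===== SOURCE B (Python) =====
-- def sortSentence(s: str) -> str:
--     # bucket words by their first digit character, then read buckets in digit
--     # order, each bucket sorted by word (same order as A's global pair sort)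
--     buckets = [[] for _ in range(10)]
--     for w in s.split(' '):
--         d = next(k for k in w if k.isdigit())
--         buckets[int(d)].append(w)
--     return ' '.join(w[:-1] for b in buckets for w in sorted(b))
-- ===== Notes on version B (the rewrite author's own statement) =====
-- stated objective: alternative
-- what changed: Replaces building [digit, word] pair-lists and globally sorting them with a 10-way bucket placement by first digit character followed by reading the buckets in digit order (each bucket sorted by word), which reproduces A's (digit, word) lexicographic order without constructing pairs.
import Mathlib
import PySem

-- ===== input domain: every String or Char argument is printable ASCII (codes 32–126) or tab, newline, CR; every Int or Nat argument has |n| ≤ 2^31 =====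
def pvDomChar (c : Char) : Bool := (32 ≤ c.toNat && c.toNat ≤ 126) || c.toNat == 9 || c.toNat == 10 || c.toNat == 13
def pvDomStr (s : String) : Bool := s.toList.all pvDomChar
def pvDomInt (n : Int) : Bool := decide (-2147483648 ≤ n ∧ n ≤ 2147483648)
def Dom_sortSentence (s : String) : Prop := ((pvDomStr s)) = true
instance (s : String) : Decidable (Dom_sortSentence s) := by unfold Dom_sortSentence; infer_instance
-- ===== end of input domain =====

-- B replaces A's global sort of [digit, word] pair-lists by a 10-way bucket
-- placement on the first digit character, reading buckets in digit order with
-- each bucket sorted by word (objective: alternative algorithm, same cost).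

-- ===== PORT A =====
-- inner loop of A: scan word i for the first digit char k, yielding [k, i] (or [] if none)
def pvPairA (cs : List Char) (i : String) : List String :=
  match cs with
  | [] => []
  | k :: t => if PySem.Chars.isdigit k then [String.ofList [k], i] else pvPairA t i

def sortSentence (s : String) : String :=
  let tmp := (PySem.Str.split? s " ").getD []      -- sep " " ≠ "", so split? is always some
  let ans := tmp.foldl (fun acc i => acc ++ [pvPairA i.toList i]) []
  let ans2 := PySem.List.sorted ans (fun x => x) false
  let res := ans2.foldl (fun acc x =>
    acc ++ [PySem.Str.slice ((PySem.List.pyGet? x 1).getD "") none (some (-1))]) []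
  PySem.Str.join " " res

-- ===== PORT B =====
-- inner loop of B: first digit character of a word (none = no digit: Python B raises StopIteration there, outside Pre_; the port skips the word)
def pvFirstDigit? (cs : List Char) : Option Char :=
  match cs with
  | [] => none
  | k :: t => if PySem.Chars.isdigit k then some k else pvFirstDigit? t

def sortSentence_alt (s : String) : String :=
  let words := (PySem.Str.split? s " ").getD []
  let buckets := words.foldl (fun bs w =>
    match pvFirstDigit? w.toList with
    | some k => bs.set (k.toNat - 48) ((bs.getD (k.toNat - 48) []) ++ [w])   -- int(k) = k.toNat - 48
    | none => bs) (List.replicate 10 [])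
  PySem.Str.join " "
    (buckets.foldl (fun acc b =>
      acc ++ (PySem.List.sorted b (fun x => x) false).map
        (fun w => PySem.Str.slice w none (some (-1)))) [])

-- ===== PRECONDITION & SPEC =====
-- Pre_ excludes exactly the inputs where A raises IndexError: some space-separated word contains no digit
def Pre_sortSentence (s : String) : Prop :=
  ∀ w ∈ (PySem.Str.split? s " ").getD [], w.toList.any PySem.Chars.isdigit = true
instance (s : String) : Decidable (Pre_sortSentence s) := by unfold Pre_sortSentence; infer_instance

def pvWitness_sortSentence : String := "is2 This1"

def Spec_sortSentence (s : String) (out : String) : Prop := out = sortSentence_alt s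
instance (s : String) (out : String) : Decidable (Spec_sortSentence s out) := by unfold Spec_sortSentence; infer_instance

-- ===== CLAIM (what is proved, stated in full; the proofs are below) =====
def Claim_equal_sortSentence : Prop := ∀ (s : String), Dom_sortSentence s → Pre_sortSentence s → Spec_sortSentence s (sortSentence s)

-- ===== LEMMAS AND PROOFS =====

-- proof-side abbreviations
def pvIx? (w : String) : Option Nat := (pvFirstDigit? w.toList).map (fun k => k.toNat - 48)
def pvTrim (w : String) : String := PySem.Str.slice w none (some (-1))
def pvPair (w : String) : List String := [String.ofList [(pvFirstDigit? w.toList).getD ' '], w]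
def pvBucket (ws : List String) (j : Nat) : List String := ws.filter (fun w => pvIx? w == some j)

theorem pvPairA_eq (cs : List Char) (i : String) :
    pvPairA cs i = match pvFirstDigit? cs with
      | some k => [String.ofList [k], i]
      | none => [] := by
  induction cs with
  | nil => rfl
  | cons c t ih => simp only [pvPairA, pvFirstDigit?]; split_ifs <;> simp [ih]

theorem pvFirstDigit?_isSome {cs : List Char} (h : ∃ c ∈ cs, PySem.Chars.isdigit c = true) :
    ∃ k, pvFirstDigit? cs = some k := by
  induction cs with
  | nil => simp at h
  | cons c t ih =>
    simp only [pvFirstDigit?]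
    split_ifs with hc
    · exact ⟨c, rfl⟩
    · apply ih; rcases h with ⟨d, hd, hdig⟩
      rcases List.mem_cons.mp hd with rfl | hd'
      · exact absurd hdig (by simp [hc])
      · exact ⟨d, hd', hdig⟩

theorem pvFirstDigit?_digit {cs : List Char} {k : Char} (h : pvFirstDigit? cs = some k) :
    48 ≤ k.toNat ∧ k.toNat ≤ 57 := by
  induction cs with
  | nil => simp [pvFirstDigit?] at h
  | cons c t ih =>
    simp only [pvFirstDigit?] at h
    split_ifs at h with hc
    · cases h
      simp only [PySem.Chars.isdigit, Bool.and_eq_true, decide_eq_true_eq] at hc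
      obtain ⟨h1, h2⟩ := hc
      simp only [Char.le_def, UInt32.le_iff_toNat_le] at h1 h2
      exact ⟨h1, h2⟩
    · exact ih h

-- the fill loop of B computes, at each index j < 10, the j-th bucket appended to the accumulator
theorem pvFill_getD (ws : List String) (bs : List (List String)) (hlen : bs.length = 10)
    (j : Nat) (hj : j < 10) :
    (ws.foldl (fun bs w =>
      match pvFirstDigit? w.toList with
      | some k => bs.set (k.toNat - 48) ((bs.getD (k.toNat - 48) []) ++ [w])
      | none => bs) bs).getD j [] = bs.getD j [] ++ pvBucket ws j := by
  induction ws generalizing bs with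
  | nil => simp [pvBucket]
  | cons w t ih =>
    simp only [List.foldl_cons]
    have hb : pvBucket (w :: t) j
        = (if pvIx? w == some j then w :: pvBucket t j else pvBucket t j) := by
      simp [pvBucket, List.filter_cons]
    cases hfd : pvFirstDigit? w.toList with
    | none =>
      rw [ih bs hlen, hb]
      simp [pvIx?, hfd]
    | some k =>
      obtain ⟨hk1, hk2⟩ := pvFirstDigit?_digit hfd
      have hix : k.toNat - 48 < 10 := by omega
      rw [ih _ (by simp [hlen]), hb]
      by_cases hij : k.toNat - 48 = j
      · subst hij
        simp [pvIx?, hfd, List.getD_eq_getElem?_getD, List.getElem?_set, hix, hlen]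
      · simp [pvIx?, hfd, hij, List.getD_eq_getElem?_getD]

theorem pvFill_length (ws : List String) (bs : List (List String)) :
    (ws.foldl (fun bs w =>
      match pvFirstDigit? w.toList with
      | some k => bs.set (k.toNat - 48) ((bs.getD (k.toNat - 48) []) ++ [w])
      | none => bs) bs).length = bs.length := by
  induction ws generalizing bs with
  | nil => rfl
  | cons w t ih =>
    simp only [List.foldl_cons]
    cases pvFirstDigit? w.toList with
    | none => exact ih bs
    | some k => rw [ih]; simp

-- a list is a permutation of its buckets concatenated
theorem pvPartition_perm {α : Type} (f : α → Option Nat) (ds : List Nat) (hnd : ds.Nodup)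
    (xs : List α) (h : ∀ x ∈ xs, ∃ j ∈ ds, f x = some j) :
    (ds.flatMap (fun j => xs.filter (fun x => f x == some j))).Perm xs := by
  induction ds generalizing xs with
  | nil =>
    cases xs with
    | nil => simp
    | cons x t => exact absurd (h x (by simp)) (by simp)
  | cons d t ih =>
    simp only [List.flatMap_cons]
    have hsplit := List.filter_append_perm (fun x => f x == some d) xs
    have htail : ∀ j ∈ t, xs.filter (fun x => f x == some j)
        = (xs.filter (fun x => !(f x == some d))).filter (fun x => f x == some j) := by
      intro j hj
      rw [List.filter_filter]
      apply List.filter_congr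
      intro x hx
      have hdj : d ≠ j := fun hdj => (List.nodup_cons.mp hnd).1 (hdj ▸ hj)
      cases hfx : f x with
      | none => simp
      | some m =>
        by_cases hmj : m = j
        · subst hmj; simp [Ne.symm hdj]
        · simp [hmj]
    have hperm2 : (t.flatMap (fun j => xs.filter (fun x => f x == some j))).Perm
        (xs.filter (fun x => !(f x == some d))) := by
      have := ih (List.nodup_cons.mp hnd).2 (xs.filter (fun x => !(f x == some d)))
        (by
          intro x hx
          obtain ⟨hx1, hx2⟩ := List.mem_filter.mp hx
          obtain ⟨j, hj, hfj⟩ := h x hx1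
          rcases List.mem_cons.mp hj with rfl | hj
          · simp [hfj] at hx2
          · exact ⟨j, hj, hfj⟩)
      rw [List.flatMap_congr htail]
      exact this
    exact (hperm2.append_left _).trans hsplit

theorem pvFlatMap_perm_congr {α : Type} (ds : List Nat) (f g : Nat → List α)
    (h : ∀ j ∈ ds, (f j).Perm (g j)) : (ds.flatMap f).Perm (ds.flatMap g) := by
  induction ds with
  | nil => simp
  | cons d t ih =>
    simp only [List.flatMap_cons]
    exact (h d (by simp)).append (ih (fun j hj => h j (by simp [hj])))

theorem pvPairwise_flatMap {α : Type} (R : α → α → Prop) (ds : List Nat) (f : Nat → List α)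
    (hin : ∀ j ∈ ds, (f j).Pairwise R)
    (hbet : ∀ i ∈ ds, ∀ j ∈ ds, i < j → ∀ a ∈ f i, ∀ b ∈ f j, R a b)
    (hsort : ds.Pairwise (· < ·)) : (ds.flatMap f).Pairwise R := by
  induction ds with
  | nil => simp
  | cons d t ih =>
    simp only [List.flatMap_cons]
    rw [List.pairwise_append]
    obtain ⟨hdt, hts⟩ := List.pairwise_cons.mp hsort
    refine ⟨hin d (by simp), ih (fun j hj => hin j (by simp [hj]))
      (fun i hi j hj hij => hbet i (by simp [hi]) j (by simp [hj]) hij) hts, ?_⟩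
    intro a ha b hb
    obtain ⟨j, hj, hbj⟩ := List.mem_flatMap.mp hb
    exact hbet d (by simp) j (by simp [hj]) (hdt j hj) a ha b hbj

-- membership in a sorted bucket pins down the word's first digit character
theorem pvMem_bucket {ws : List String} {j : Nat} {w : String}
    (h : w ∈ PySem.List.sorted (pvBucket ws j) (fun x => x) false) :
    ∃ k, pvFirstDigit? w.toList = some k ∧ k.toNat = j + 48 := by
  have hw := (PySem.List.mem_sorted _ _ _ _).mp h
  have := List.mem_filter.mp hw
  obtain ⟨-, hfx⟩ := this
  simp only [pvIx?, beq_iff_eq] at hfx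
  cases hfd : pvFirstDigit? w.toList with
  | none => rw [hfd] at hfx; simp at hfx
  | some k =>
    rw [hfd] at hfx
    simp only [Option.map_some, Option.some_inj] at hfx
    obtain ⟨hk1, hk2⟩ := pvFirstDigit?_digit hfd
    exact ⟨k, rfl, by omega⟩

-- Lean's two orders on List String (the core Lt used by the ports' sort, and
-- Mathlib's LinearOrder used by the sorted-characterisation lemmas) are
-- propositionally the same relation; bridge them once
theorem pvListLt_iff (l1 l2 : List String) :
    @LT.lt _ List.instLT l1 l2 ↔
    @LT.lt _ (@LinearOrder.toPartialOrder _ List.instLinearOrder).toPreorder.toLT l1 l2 :=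
  List.lt_iff_lex_lt l1 l2

theorem pvSorted_inst (xs : List (List String)) :
    @PySem.List.sorted _ _ List.instLT (fun a b => a.decidableLT b) xs (fun x => x) false
  = @PySem.List.sorted _ _ (@LinearOrder.toPartialOrder _ List.instLinearOrder).toPreorder.toLT
      (@LinearOrder.toDecidableLT _ List.instLinearOrder) xs (fun x => x) false := by
  rw [@PySem.List.sorted_eq_foldl_insertBy _ _ List.instLT (fun a b => a.decidableLT b),
      @PySem.List.sorted_eq_foldl_insertBy _ _ _ (@LinearOrder.toDecidableLT _ List.instLinearOrder)]
  congr 1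
  funext acc x
  congr 1
  funext a b
  exact decide_eq_decide.mpr (pvListLt_iff a b)

theorem pvPair_le_same (c : Char) (w1 w2 : String) (h : w1 ≤ w2) :
    @LE.le _ (@Preorder.toLE _ (@PartialOrder.toPreorder _
      (@LinearOrder.toPartialOrder _ List.instLinearOrder)))
      [String.ofList [c], w1] [String.ofList [c], w2] := by
  rcases eq_or_lt_of_le h with rfl | hlt
  · exact le_refl _
  · apply le_of_lt
    show List.Lex _ _ _
    exact List.Lex.cons (List.Lex.rel hlt)

theorem pvPair_le_of_char_lt (c1 c2 : Char) (w1 w2 : String) (h : c1 < c2) :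
    @LE.le _ (@Preorder.toLE _ (@PartialOrder.toPreorder _
      (@LinearOrder.toPartialOrder _ List.instLinearOrder)))
      [String.ofList [c1], w1] [String.ofList [c2], w2] := by
  apply le_of_lt
  show List.Lex _ _ _
  apply List.Lex.rel
  rw [String.lt_iff_toList_lt]
  simp only [String.toList_ofList]
  exact (List.lt_iff_lex_lt _ _).mpr (List.Lex.rel h)

theorem pvMain (s : String) (hpre : Pre_sortSentence s) :
    sortSentence s = sortSentence_alt s := by
  unfold sortSentence sortSentence_alt Pre_sortSentence at *
  set ws := (PySem.Str.split? s " ").getD [] with hws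
  simp only [PySem.List.foldl_append_singleton_eq_map, PySem.List.foldl_append_eq_flatMap,
    List.nil_append]
  -- A's pair list is ws.map pvPair
  have hpairs : ws.map (fun i => pvPairA i.toList i) = ws.map pvPair := by
    apply List.map_congr_left
    intro w hw
    obtain ⟨k, hk⟩ := pvFirstDigit?_isSome (List.any_eq_true.mp (hpre w hw))
    rw [pvPairA_eq, hk, pvPair, hk]
    rfl
  rw [hpairs]
  -- B's buckets are the pvBucket filters, in digit order
  have hbuckets : (ws.foldl (fun bs w =>
      match pvFirstDigit? w.toList with
      | some k => bs.set (k.toNat - 48) ((bs.getD (k.toNat - 48) []) ++ [w])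
      | none => bs) (List.replicate 10 []))
      = (List.range 10).map (fun j => pvBucket ws j) := by
    apply List.ext_getElem
    · rw [pvFill_length]; simp
    · intro j hj1 hj2
      rw [pvFill_length] at hj1
      simp only [List.length_replicate] at hj1
      have h1 : ∀ (l : List (List String)) (hjl : j < l.length), l[j] = l.getD j [] := by
        intro l hjl
        simp [List.getD_eq_getElem?_getD, List.getElem?_eq_getElem hjl]
      rw [h1 _ (by rw [pvFill_length]; simpa), pvFill_getD ws _ (by simp) j hj1]
      simp only [List.getElem_map, List.getElem_range]
      rw [show (List.replicate 10 ([] : List String)).getD j [] = [] by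
        rw [List.getD_eq_getElem?_getD, List.getElem?_replicate]
        simp [hj1]]
      simp
  rw [hbuckets, List.flatMap_map]
  -- the sorted pair list, chunked by digit
  have hsorted : PySem.List.sorted (ws.map pvPair) (fun x => x) false
      = (List.range 10).flatMap
          (fun j => (PySem.List.sorted (pvBucket ws j) (fun x => x) false).map pvPair) := by
    rw [pvSorted_inst]
    apply PySem.List.sorted_id_eq_of_perm_of_pairwise
    · -- permutation
      have h1 : ((List.range 10).flatMap
          (fun j => (PySem.List.sorted (pvBucket ws j) (fun x => x) false).map pvPair)).Perm
          ((List.range 10).flatMap (fun j => (pvBucket ws j).map pvPair)) :=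
        pvFlatMap_perm_congr _ _ _
          (fun j _ => (PySem.List.sorted_perm (pvBucket ws j) (fun x => x) false).map pvPair)
      have h2 : (List.range 10).flatMap (fun j => (pvBucket ws j).map pvPair)
          = ((List.range 10).flatMap (fun j => pvBucket ws j)).map pvPair := by
        rw [List.map_flatMap]
      have h3 : ((List.range 10).flatMap (fun j => pvBucket ws j)).Perm ws := by
        apply pvPartition_perm pvIx? (List.range 10) (List.nodup_range) ws
        intro w hw
        obtain ⟨k, hk⟩ := pvFirstDigit?_isSome (List.any_eq_true.mp (hpre w hw))
        obtain ⟨hk1, hk2⟩ := pvFirstDigit?_digit hk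
        exact ⟨k.toNat - 48, List.mem_range.mpr (by omega), by simp [pvIx?, hk]⟩
      exact h1.trans (h2 ▸ h3.map pvPair)
    · -- pairwise ≤
      apply pvPairwise_flatMap
      · intro j _
        rw [List.pairwise_map]
        apply List.Pairwise.imp_of_mem ?_
          (PySem.List.sorted_pairwise (pvBucket ws j) (fun x => x))
        intro w1 w2 h1 h2 hle
        obtain ⟨k1, hk1, hn1⟩ := pvMem_bucket h1
        obtain ⟨k2, hk2, hn2⟩ := pvMem_bucket h2
        have : k1 = k2 := Char.ext (UInt32.toNat_inj.mp (by
          show k1.toNat = k2.toNat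
          omega))
        simp only [pvPair, hk1, hk2, Option.getD_some, this]
        exact pvPair_le_same k2 w1 w2 hle
      · intro i _ j _ hij a ha b hb
        obtain ⟨w1, h1, rfl⟩ := List.mem_map.mp ha
        obtain ⟨w2, h2, rfl⟩ := List.mem_map.mp hb
        obtain ⟨k1, hk1, hn1⟩ := pvMem_bucket h1
        obtain ⟨k2, hk2, hn2⟩ := pvMem_bucket h2
        have hlt : k1 < k2 := by
          rw [Char.lt_def, UInt32.lt_iff_toNat_lt]
          show k1.toNat < k2.toNat
          omega
        simp only [pvPair, hk1, hk2, Option.getD_some]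
        exact pvPair_le_of_char_lt k1 k2 w1 w2 hlt
      · exact List.pairwise_lt_range
  rw [hsorted, List.map_flatMap]
  congr 1
  apply List.flatMap_congr
  intro j _
  rw [List.map_map]
  apply List.map_congr_left
  intro w hw
  obtain ⟨k, hk, -⟩ := pvMem_bucket hw
  simp only [Function.comp_apply, pvPair]
  rfl

-- ===== VERDICT (by name: the statement is the Claim_ definition above) =====
theorem sortSentence_spec : Claim_equal_sortSentence := by
  intro s _ hpre
  unfold Spec_sortSentence
  exact pvMain s hpre
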